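-- pv_equiv track=rewrite | github.com/amauri-di-maia/machine | brickovery/ingest/upstream.py | _score_mapping_table
-- ===== SOURCE A (Python) =====
-- from typing import Dict, Any, List, Tuple, Optional
--
-- def _score_mapping_table(cols: List[str]) -> int:
--     low = [c.lower() for c in cols]
--     score = 0
--     if any(("bricklink" in c) or ("bl_" in c) or ("part_id" in c) or ("partno" in c) for c in low):
--         score += 3
--     if any(("color" in c) for c in low):
--         score += 2
--     if any(("boid" in c) or ("brickowl" in c) for c in low):
--         score += 3
--     if any(("itemtype" in c) or (c == "type") or ("item_type" in c) for c in low):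
--         score += 1
--     if any(("weight" in c) or ("grams" in c) or ("mass" in c) for c in low):
--         score += 1
--     return score
-- ===== SOURCE B (Python) =====
-- def _score_mapping_table(cols):
--     has_bl = has_color = has_owl = has_type = has_weight = False
--     for c in cols:
--         c = c.lower()
--         if any(k in c for k in ("bricklink", "bl_", "part_id", "partno")):
--             has_bl = True
--         if "color" in c:
--             has_color = True
--         if "boid" in c or "brickowl" in c:
--             has_owl = True
--         if "itemtype" in c or c == "type" or "item_type" in c:
--             has_type = True
--         if "weight" in c or "grams" in c or "mass" in c:
--             has_weight = True
--     return 3 * has_bl + 2 * has_color + 3 * has_owl + 1 * has_type + 1 * has_weight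
-- ===== Notes on version B (the rewrite author's own statement) =====
-- stated objective: alternative
-- what changed: Replaces five separate any() scans over a pre-lowered copy of the list with a single pass that lowers each column once and maintains five booleans, summing the weights of the set flags at the end.
import Mathlib
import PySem

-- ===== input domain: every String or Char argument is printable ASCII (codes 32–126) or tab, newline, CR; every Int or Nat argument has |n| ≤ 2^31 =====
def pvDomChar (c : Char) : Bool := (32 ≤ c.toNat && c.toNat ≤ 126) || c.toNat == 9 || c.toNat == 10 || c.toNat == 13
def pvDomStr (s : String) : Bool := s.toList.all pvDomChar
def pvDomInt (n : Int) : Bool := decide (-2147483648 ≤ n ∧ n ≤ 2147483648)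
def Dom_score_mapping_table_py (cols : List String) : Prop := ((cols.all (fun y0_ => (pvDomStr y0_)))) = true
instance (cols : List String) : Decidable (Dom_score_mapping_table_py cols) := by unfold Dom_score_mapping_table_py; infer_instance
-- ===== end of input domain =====

-- B replaces A's five separate any() scans over a pre-lowered list with a single pass
-- maintaining five booleans, summing the weights of the set flags at the end (alternative decomposition).


-- ===== PORT A =====
def score_mapping_table_py (cols : List String) : Int :=
  let low := cols.map PySem.Str.lower
  let score : Int := 0
  let score := if low.any (fun c => PySem.Str.isIn "bricklink" c || PySem.Str.isIn "bl_" c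
      || PySem.Str.isIn "part_id" c || PySem.Str.isIn "partno" c) then score + 3 else score
  let score := if low.any (fun c => PySem.Str.isIn "color" c) then score + 2 else score
  let score := if low.any (fun c => PySem.Str.isIn "boid" c || PySem.Str.isIn "brickowl" c) then score + 3 else score
  let score := if low.any (fun c => PySem.Str.isIn "itemtype" c || c == "type"
      || PySem.Str.isIn "item_type" c) then score + 1 else score
  let score := if low.any (fun c => PySem.Str.isIn "weight" c || PySem.Str.isIn "grams" c
      || PySem.Str.isIn "mass" c) then score + 1 else score
  score

-- ===== PORT B =====
-- per-column tests on the already-lowered column (B lowers each column once inside the loop)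
def pvBlHit (c : String) : Bool := ["bricklink", "bl_", "part_id", "partno"].any (fun k => PySem.Str.isIn k c)
def pvColorHit (c : String) : Bool := PySem.Str.isIn "color" c
def pvOwlHit (c : String) : Bool := PySem.Str.isIn "boid" c || PySem.Str.isIn "brickowl" c
def pvTypeHit (c : String) : Bool := PySem.Str.isIn "itemtype" c || c == "type" || PySem.Str.isIn "item_type" c
def pvWeightHit (c : String) : Bool := PySem.Str.isIn "weight" c || PySem.Str.isIn "grams" c || PySem.Str.isIn "mass" c

-- one loop iteration of B: lower the column, flip each flag its keyword group matches
def pvStep (st : Bool × Bool × Bool × Bool × Bool) (c0 : String) : Bool × Bool × Bool × Bool × Bool :=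
  let c := PySem.Str.lower c0
  let st := if pvBlHit c then (true, st.2) else st
  let st := if pvColorHit c then (st.1, true, st.2.2) else st
  let st := if pvOwlHit c then (st.1, st.2.1, true, st.2.2.2) else st
  let st := if pvTypeHit c then (st.1, st.2.1, st.2.2.1, true, st.2.2.2.2) else st
  let st := if pvWeightHit c then (st.1, st.2.1, st.2.2.1, st.2.2.2.1, true) else st
  st

def score_mapping_table_py_alt (cols : List String) : Int :=
  let flags := cols.foldl pvStep (false, false, false, false, false)
  3 * (if flags.1 then (1:Int) else 0) + 2 * (if flags.2.1 then 1 else 0)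
    + 3 * (if flags.2.2.1 then 1 else 0) + 1 * (if flags.2.2.2.1 then 1 else 0)
    + 1 * (if flags.2.2.2.2 then 1 else 0)

-- ===== PRECONDITION & SPEC =====
def Spec_score_mapping_table_py (cols : List String) (out : Int) : Prop := out = score_mapping_table_py_alt cols
instance (cols : List String) (out : Int) : Decidable (Spec_score_mapping_table_py cols out) := by unfold Spec_score_mapping_table_py; infer_instance

-- ===== CLAIM (what is proved, stated in full; the proofs are below) =====
def Claim_equal_score_mapping_table_py : Prop := ∀ (cols : List String), Dom_score_mapping_table_py cols → Spec_score_mapping_table_py cols (score_mapping_table_py cols)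

-- ===== LEMMAS AND PROOFS =====

theorem pv_step_eq (st : Bool × Bool × Bool × Bool × Bool) (c : String) :
    pvStep st c = (st.1 || pvBlHit (PySem.Str.lower c),
      st.2.1 || pvColorHit (PySem.Str.lower c),
      st.2.2.1 || pvOwlHit (PySem.Str.lower c),
      st.2.2.2.1 || pvTypeHit (PySem.Str.lower c),
      st.2.2.2.2 || pvWeightHit (PySem.Str.lower c)) := by
  obtain ⟨b1, b2, b3, b4, b5⟩ := st
  unfold pvStep
  dsimp only
  split_ifs <;> simp_all

-- the fold's flags are the initial flags OR-ed with 'some column hits'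
theorem pv_fold_flags (cols : List String) (b1 b2 b3 b4 b5 : Bool) :
    cols.foldl pvStep (b1, b2, b3, b4, b5)
    = (b1 || cols.any (fun c => pvBlHit (PySem.Str.lower c)),
       b2 || cols.any (fun c => pvColorHit (PySem.Str.lower c)),
       b3 || cols.any (fun c => pvOwlHit (PySem.Str.lower c)),
       b4 || cols.any (fun c => pvTypeHit (PySem.Str.lower c)),
       b5 || cols.any (fun c => pvWeightHit (PySem.Str.lower c))) := by
  induction cols generalizing b1 b2 b3 b4 b5 with
  | nil => simp
  | cons c cs ih =>
    rw [List.foldl_cons, pv_step_eq, ih]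
    simp [Bool.or_assoc]

-- ===== VERDICT (by name: the statement is the Claim_ definition above) =====
theorem score_mapping_table_py_spec : Claim_equal_score_mapping_table_py := by
  intro cols _
  unfold Spec_score_mapping_table_py score_mapping_table_py score_mapping_table_py_alt
  dsimp only
  rw [pv_fold_flags]
  simp only [List.any_map, Function.comp_def, pvBlHit, pvColorHit, pvOwlHit, pvTypeHit,
    pvWeightHit, List.any_cons, List.any_nil, Bool.or_false, Bool.false_or, Bool.or_assoc]
  split_ifs <;> norm_num
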